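-- pv_equiv track=rewrite | github.com/gowtham91m/Python | number_convert_v2.py | final_test
-- ===== SOURCE A (Python) =====
-- def oper_a(a):
--     b=[]
--     b.append(a[1])
--     b.append(a[0]+a[1])
--     return(b)
--
-- def oper_b(a):
--     b=[]
--     b.append(a[0]+a[1])
--     b.append(a[1])
--     return(b)
--
-- t=[[0,0],[0,1],[1,0],[1,1]]
--
-- def final_test(a):
--     for i in range(len(t)):
--         if t[i][0]==0:
--             b=oper_a(a[0:2])
--         else:
--             b=oper_b(a[0:2])
--         if t[i][1]==0:
--             b=oper_a(b)
--         else: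
--             b=oper_b(b)
--         if a[2:]==b:
--             return True
--             break
--     return False
-- ===== SOURCE B (Python) =====
-- def final_test(a):
--     x, y = a[0], a[1]
--     return a[2:] in [[x + y, x + 2 * y], [x + 2 * y, x + y], [y, x + 2 * y], [x + 2 * y, y]]
-- ===== Notes on version B (the rewrite author's own statement) =====
-- stated objective: simpler
-- what changed: Replaced the table-driven loop composing oper_a/oper_b with a closed-form enumeration of the four possible result pairs and a single membership test.
import Mathlib
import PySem

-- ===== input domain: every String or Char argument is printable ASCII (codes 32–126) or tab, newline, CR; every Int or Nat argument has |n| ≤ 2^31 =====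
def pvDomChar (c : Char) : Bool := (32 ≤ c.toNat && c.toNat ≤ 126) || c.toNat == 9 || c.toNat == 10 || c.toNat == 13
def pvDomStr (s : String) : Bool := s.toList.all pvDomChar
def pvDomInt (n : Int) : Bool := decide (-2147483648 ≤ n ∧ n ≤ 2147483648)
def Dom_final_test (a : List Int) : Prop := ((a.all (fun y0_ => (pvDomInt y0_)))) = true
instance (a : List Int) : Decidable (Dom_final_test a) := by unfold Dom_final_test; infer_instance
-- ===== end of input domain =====

-- B replaces the table-driven double-operation loop by a closed-form list of the four candidate pairs and one membership test (simpler).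


-- ===== PORT A =====
def oper_a (a : List Int) : List Int :=
  let b : List Int := []
  let b := b ++ [PySem.List.pyGetD a 1 0]
  let b := b ++ [PySem.List.pyGetD a 0 0 + PySem.List.pyGetD a 1 0]
  b

def oper_b (a : List Int) : List Int :=
  let b : List Int := []
  let b := b ++ [PySem.List.pyGetD a 0 0 + PySem.List.pyGetD a 1 0]
  let b := b ++ [PySem.List.pyGetD a 1 0]
  b

def tTab : List (List Int) := [[0,0],[0,1],[1,0],[1,1]]

-- the for-loop with early return, as structural recursion over the range list
def ftLoop (a : List Int) : List Int → Bool
  | [] => false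
  | i :: rest =>
    let ti := PySem.List.pyGetD tTab i []
    let b := if PySem.List.pyGetD ti 0 0 = 0 then oper_a (PySem.List.slice a (some 0) (some 2))
             else oper_b (PySem.List.slice a (some 0) (some 2))
    let b := if PySem.List.pyGetD ti 1 0 = 0 then oper_a b else oper_b b
    if PySem.List.slice a (some 2) none = b then true else ftLoop a rest

def final_test (a : List Int) : Bool :=
  ftLoop a (PySem.List.pyRange 0 (tTab.length) 1)

-- ===== PORT B =====
def final_test_alt (a : List Int) : Bool :=
  let x := PySem.List.pyGetD a 0 0
  let y := PySem.List.pyGetD a 1 0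
  decide (PySem.List.slice a (some 2) none ∈
    [[x + y, x + 2 * y], [x + 2 * y, x + y], [y, x + 2 * y], [x + 2 * y, y]])

-- ===== PRECONDITION & SPEC =====
-- Pre_ excludes lists of length < 2, on which both A and B raise IndexError (a[1] / a[0],a[1]).
def Pre_final_test (a : List Int) : Prop := 2 ≤ a.length
instance (a : List Int) : Decidable (Pre_final_test a) := by unfold Pre_final_test; infer_instance
def pvWitness_final_test : List Int := [1, 2, 3]

def Spec_final_test (a : List Int) (out : Bool) : Prop := out = final_test_alt a
instance (a : List Int) (out : Bool) : Decidable (Spec_final_test a out) := by unfold Spec_final_test; infer_instance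

-- ===== CLAIM (what is proved, stated in full; the proofs are below) =====
def Claim_equal_final_test : Prop := ∀ (a : List Int), Dom_final_test a → Pre_final_test a → Spec_final_test a (final_test a)

-- ===== LEMMAS AND PROOFS =====
theorem oper_a_pair (p q : Int) : oper_a [p, q] = [q, p + q] := by
  simp [oper_a, pysem]

theorem oper_b_pair (p q : Int) : oper_b [p, q] = [p + q, q] := by
  simp [oper_b, pysem]

theorem slice02_cons (x y : Int) (rest : List Int) :
    PySem.List.slice (x :: y :: rest) (some 0) (some 2) = [x, y] := by
  simp [PySem.List.slice_toNat]

theorem slice2_cons (x y : Int) (rest : List Int) :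
    PySem.List.slice (x :: y :: rest) (some 2) none = rest := by
  rw [show (2:Int) = ((2:Nat):Int) from rfl, PySem.List.slice_from_natCast]
  rfl

theorem getD0_cons (x y : Int) (rest : List Int) :
    PySem.List.pyGetD (x :: y :: rest) 0 0 = x := PySem.List.pyGetD_zero_cons x (y :: rest) 0

theorem getD1_cons (x y : Int) (rest : List Int) :
    PySem.List.pyGetD (x :: y :: rest) 1 0 = y := by
  have : PySem.List.pyGetD (x :: y :: rest) ((1:Nat) : Int) 0 = (x :: y :: rest).getD 1 0 :=
    PySem.List.pyGetD_natCast _ _ _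
  simpa using this

-- ===== VERDICT (by name: the statement is the Claim_ definition above) =====
theorem final_test_spec : Claim_equal_final_test := by
  intro a _ hpre
  match a with
  | x :: y :: rest =>
    simp only [Spec_final_test, final_test, final_test_alt]
    rw [show PySem.List.pyRange 0 (tTab.length : Int) 1 = [0, 1, 2, 3] from by decide]
    simp only [ftLoop, slice02_cons, slice2_cons, getD0_cons, getD1_cons,
      show PySem.List.pyGetD tTab 0 ([] : List Int) = [0, 0] from by decide,
      show PySem.List.pyGetD tTab 1 ([] : List Int) = [0, 1] from by decide,
      show PySem.List.pyGetD tTab 2 ([] : List Int) = [1, 0] from by decide,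
      show PySem.List.pyGetD tTab 3 ([] : List Int) = [1, 1] from by decide,
      show PySem.List.pyGetD ([0, 0] : List Int) 0 0 = 0 from by decide,
      show PySem.List.pyGetD ([0, 0] : List Int) 1 0 = 0 from by decide,
      show PySem.List.pyGetD ([0, 1] : List Int) 0 0 = 0 from by decide,
      show PySem.List.pyGetD ([0, 1] : List Int) 1 0 = 1 from by decide,
      show PySem.List.pyGetD ([1, 0] : List Int) 0 0 = 1 from by decide,
      show PySem.List.pyGetD ([1, 0] : List Int) 1 0 = 0 from by decide,
      show PySem.List.pyGetD ([1, 1] : List Int) 0 0 = 1 from by decide,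
      show PySem.List.pyGetD ([1, 1] : List Int) 1 0 = 1 from by decide]
    norm_num [oper_a_pair, oper_b_pair]
    ring_nf
  | [] => simp [Pre_final_test] at hpre
  | [x] => simp [Pre_final_test] at hpre
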